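-- pv_equiv track=rewrite | github.com/fergusq/mango | mango/document.py | substituteCharacterEscapes
-- ===== SOURCE A (Python) =====
-- def substituteCharacterEscapes(text: str) -> str:
--     ans = ""
--     i = 0
--     while i < len(text):
--         if text[i] == "\\":
--             if text[i+1] == "n":
--                 ans += "\n"
--                 i += 2
--                 continue
--
--             ans += text[i:i+2]
--             i += 2
--             continue
--
--         ans += text[i]
--         i += 1
--
--     return ans
-- ===== SOURCE B (Python) =====
-- def substituteCharacterEscapes(text: str) -> str:
--     parts = []
--     rest = text
--     while True:
--         j = rest.find("\\")
--         if j == -1: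
--             parts.append(rest)
--             break
--         parts.append(rest[:j])
--         c = rest[j+1]
--         parts.append("\n" if c == "n" else rest[j:j+2])
--         rest = rest[j+2:]
--     return "".join(parts)
-- ===== Notes on version B (the rewrite author's own statement) =====
-- stated objective: faster
-- what changed: Replaces the char-by-char scan with repeated single-char string concatenation by a find-driven chunk scan that collects whole backslash-free runs and joins the parts once at the end.
import Mathlib
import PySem

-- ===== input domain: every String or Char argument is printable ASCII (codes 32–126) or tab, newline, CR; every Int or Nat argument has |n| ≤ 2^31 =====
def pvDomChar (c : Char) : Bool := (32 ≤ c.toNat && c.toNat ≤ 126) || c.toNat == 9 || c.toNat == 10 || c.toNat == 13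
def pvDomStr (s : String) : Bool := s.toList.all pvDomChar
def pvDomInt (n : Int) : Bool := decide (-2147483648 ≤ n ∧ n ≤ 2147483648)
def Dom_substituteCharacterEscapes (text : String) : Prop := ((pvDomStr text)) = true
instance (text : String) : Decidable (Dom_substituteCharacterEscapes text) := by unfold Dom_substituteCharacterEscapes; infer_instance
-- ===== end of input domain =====

-- ===== PORT A =====
-- B changes the char-by-char scan of A into a find-driven chunk scan; both raise on a trailing unpaired backslash (excluded by Pre_).
-- Port of A's while loop: index i over text becomes structural recursion over the remaining characters,
-- with the accumulated answer `ans` carried along.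
def pvLoopA (cs : List Char) (ans : List Char) : List Char :=
  match cs with
  | [] => ans
  | c :: rest =>
    if c = '\\' then
      match rest with
      | c2 :: rest2 =>
        if c2 = 'n' then pvLoopA rest2 (ans ++ ['\n'])
        else pvLoopA rest2 (ans ++ [c, c2])
      | [] => ans  -- Python raises IndexError here (text[i+1]); excluded by Pre_
    else pvLoopA rest (ans ++ [c])

def substituteCharacterEscapes (text : String) : String :=
  String.mk (pvLoopA text.toList [])

-- ===== PORT B =====
-- Port of B's while loop: `rest` is the unprocessed suffix, `parts` the collected chunks,
-- rest.find("\\") is PySem.Chars.find.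
def pvLoopB (cs : List Char) (parts : List (List Char)) : List (List Char) :=
  let j := PySem.Chars.find cs ['\\']
  if j = -1 then parts ++ [cs]
  else
    match h : cs.drop (j.toNat + 1) with
    | c :: rest2 =>
      pvLoopB rest2
        (parts ++ [cs.take j.toNat, if c = 'n' then ['\n'] else ['\\', c]])
    | [] => parts ++ [cs.take j.toNat]  -- Python raises IndexError here (rest[j+1]); excluded by Pre_
termination_by cs.length
decreasing_by
  have := congrArg List.length h
  simp [List.length_drop] at this
  omega

def substituteCharacterEscapes_alt (text : String) : String :=
  String.mk (pvLoopB text.toList []).flatten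

-- ===== PRECONDITION & SPEC =====
-- Pre_ excludes exactly the strings whose trailing run of backslashes has odd length:
-- there the scan reaches a final unpaired backslash and Python A raises IndexError on text[i+1].
def Pre_substituteCharacterEscapes (text : String) : Prop :=
  (text.toList.reverse.takeWhile (· == '\\')).length % 2 = 0
instance (text : String) : Decidable (Pre_substituteCharacterEscapes text) := by
  unfold Pre_substituteCharacterEscapes; infer_instance
def pvWitness_substituteCharacterEscapes : String := "a\\nb\\xc\\\\"

def Spec_substituteCharacterEscapes (text : String) (out : String) : Prop := out = substituteCharacterEscapes_alt text
instance (text : String) (out : String) : Decidable (Spec_substituteCharacterEscapes text out) := by unfold Spec_substituteCharacterEscapes; infer_instance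

-- ===== CLAIM (what is proved, stated in full; the proofs are below) =====
def Claim_equal_substituteCharacterEscapes : Prop := ∀ (text : String), Dom_substituteCharacterEscapes text → Pre_substituteCharacterEscapes text → Spec_substituteCharacterEscapes text (substituteCharacterEscapes text)

-- ===== LEMMAS AND PROOFS =====
-- Common specification: the value both loops compute.
def pvSub : List Char → List Char
  | [] => []
  | '\\' :: [] => []
  | '\\' :: c :: r => (if c = 'n' then ['\n'] else ['\\', c]) ++ pvSub r
  | c :: r => c :: pvSub r

theorem pvSub_cons_ne (c : Char) (r : List Char) (h : c ≠ '\\') :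
    pvSub (c :: r) = c :: pvSub r := by
  cases r <;> simp [pvSub, h]

theorem pvSub_append_clean (p t : List Char) (h : ∀ c ∈ p, c ≠ '\\') :
    pvSub (p ++ t) = p ++ pvSub t := by
  induction p with
  | nil => simp
  | cons c p ih =>
    have hc : c ≠ '\\' := h c (by simp)
    rw [List.cons_append, pvSub_cons_ne c _ hc, ih (fun x hx => h x (by simp [hx]))]
    simp

theorem pvLoopA_eq (cs ans : List Char) : pvLoopA cs ans = ans ++ pvSub cs := by
  fun_induction pvLoopA cs ans
  case case1 ans => simp [pvSub]
  case case2 ans rest2 ih => simp [pvSub, ih]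
  case case3 ans c2 rest2 h ih => simp [pvSub, h, ih]
  case case4 ans => simp [pvSub]
  case case5 ans c rest h ih => rw [pvSub_cons_ne c rest h]; simp [ih]


theorem pvFind_decomp (cs : List Char) (h : ¬ PySem.Chars.find cs ['\\'] = -1) :
    (∀ c ∈ cs.take (PySem.Chars.find cs ['\\']).toNat, c ≠ '\\') ∧
      cs = cs.take (PySem.Chars.find cs ['\\']).toNat ++
        '\\' :: cs.drop ((PySem.Chars.find cs ['\\']).toNat + 1) := by
  have h0 : 0 ≤ PySem.Chars.find cs ['\\'] := by
    have := PySem.Chars.neg_one_le_find cs ['\\']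
    omega
  obtain ⟨hpre, hmin⟩ := PySem.Chars.find_spec h0
  set j := (PySem.Chars.find cs ['\\']).toNat with hjdef
  have hdropj : cs.drop j = '\\' :: cs.drop (j + 1) := by
    obtain ⟨t, ht⟩ := hpre
    rw [← ht]
    have : cs.drop (j + 1) = (cs.drop j).tail := by
      rw [← List.tail_drop]
    rw [this, ← ht]
    simp
  refine ⟨?_, ?_⟩
  · intro c hc hcEq
    rw [List.mem_take_iff_getElem] at hc
    obtain ⟨i, hi, hgi⟩ := hc
    have hij : i < j := lt_of_lt_of_le hi (min_le_left _ _)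
    have hil : i < cs.length := lt_of_lt_of_le hi (min_le_right _ _)
    exact hmin i hij (by
      rw [List.drop_eq_getElem_cons hil, hgi, hcEq]
      exact ⟨_, rfl⟩)
  · conv_lhs => rw [← List.take_append_drop j cs]
    rw [hdropj]

theorem pvLoopB_flatten (cs : List Char) (parts : List (List Char)) :
    (pvLoopB cs parts).flatten = parts.flatten ++ pvSub cs := by
  fun_induction pvLoopB cs parts
  case case1 cs parts j hj =>
    have hnf : ¬ (['\\'] <:+: cs) := (PySem.Chars.find_eq_neg_one_iff cs ['\\']).mp hj
    have hcl : ∀ c ∈ cs, c ≠ '\\' := by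
      intro c hc hcEq
      exact hnf ((List.singleton_infix_iff _ _).mpr (by simpa [hcEq] using hc))
    have : pvSub cs = cs := by
      simpa [pvSub] using pvSub_append_clean cs [] hcl
    simp [this]
  case case2 cs parts j hj c rest2 h ih =>
    obtain ⟨hcl, hdec⟩ := pvFind_decomp cs hj
    simp only [dite_eq_ite] at ih
    rw [ih]
    conv_rhs => rw [hdec, h]
    rw [pvSub_append_clean _ _ hcl]
    simp [pvSub]
    rfl
  case case3 cs parts j hj h =>
    obtain ⟨hcl, hdec⟩ := pvFind_decomp cs hj
    conv_rhs => rw [hdec, h]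
    rw [pvSub_append_clean _ _ hcl]
    simp [pvSub]
    rfl


-- ===== VERDICT (by name: the statement is the Claim_ definition above) =====
theorem substituteCharacterEscapes_spec : Claim_equal_substituteCharacterEscapes := by
  intro text _ _
  unfold Spec_substituteCharacterEscapes substituteCharacterEscapes substituteCharacterEscapes_alt
  rw [pvLoopA_eq, pvLoopB_flatten]
  simp
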